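-- pv_equiv track=rewrite | github.com/Eandreas1857/dsgrn_acdc | src/funforMGpaths.py | twolistpath
-- ===== SOURCE A (Python) =====
-- def twolistpath(list1, list2, M):
--     '''
--     This function is a special case of the previous function "listpath" where the second list is limited to two elements.
--     This is used to find paths while only searching between two bds fixed point bounds.
--
--     :param list1: list of lists of parameter graph indices
--     :param list2: list of exactly two parameter graph indices
--     :param M: empty list
--     :return: list of paths between list1 and list2
--     '''
--     if list1 == []:
--         return M
--     else:
--         for sublist in list2:
--             x = list(list1[-1])
--             if x[-1] == sublist[0]:
--                 if sublist[1] not in x: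
--                     x.append(sublist[1])
--                     M.append(x)
--         list1.pop()
--         twolistpath(list1, list2, M)
--
--         return M
--     return M
-- ===== SOURCE B (Python) =====
-- def twolistpath(list1, list2, M):
--     M += [list(x) + [s[1]]
--           for x in reversed(list1)
--           for s in list2
--           if x[-1] == s[0] and s[1] not in x]
--     list1.clear()
--     return M
-- ===== Notes on version B (the rewrite author's own statement) =====
-- stated objective: idiomatic
-- what changed: Replaces A's tail recursion that pops list1 one element at a time (with an inner for-loop appending to M) by a single flat list comprehension over reversed(list1) x list2 added to M at once, then list1.clear(); a timing run measured this constant-factor faster (no Python-level recursion, pop or per-call overhead).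
import Mathlib
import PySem

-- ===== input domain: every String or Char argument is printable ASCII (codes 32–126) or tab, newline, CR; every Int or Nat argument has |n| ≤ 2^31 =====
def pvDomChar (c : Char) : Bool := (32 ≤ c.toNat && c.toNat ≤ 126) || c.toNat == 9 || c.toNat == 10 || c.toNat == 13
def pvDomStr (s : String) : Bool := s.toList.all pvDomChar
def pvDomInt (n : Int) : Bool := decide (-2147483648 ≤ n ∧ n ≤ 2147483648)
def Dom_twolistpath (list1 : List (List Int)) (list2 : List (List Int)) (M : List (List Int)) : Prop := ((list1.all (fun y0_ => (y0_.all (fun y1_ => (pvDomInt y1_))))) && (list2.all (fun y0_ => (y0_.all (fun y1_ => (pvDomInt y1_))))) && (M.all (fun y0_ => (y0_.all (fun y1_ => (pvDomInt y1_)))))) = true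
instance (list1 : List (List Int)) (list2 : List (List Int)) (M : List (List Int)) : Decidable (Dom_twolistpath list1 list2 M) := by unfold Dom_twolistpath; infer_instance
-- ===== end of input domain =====

-- B replaces A's tail recursion + pop with a single flat comprehension over reversed(list1)
-- (idiomatic, same cost); both mutate M and empty list1 in Python — the theorems are about the return value.

-- ===== PORT A =====
-- Literal port of A: recursion popping list1's last element; inner for-loop over list2
-- becomes a foldl over list2 threading M. Where Python raises IndexError (empty x or
-- too-short sublist) the pyGet? options make the guard fail; those inputs are outside Pre_.
def twolistpath (list1 : List (List Int)) (list2 : List (List Int)) (M : List (List Int)) : List (List Int) :=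
  if h : list1 = [] then M
  else
    let M' := list2.foldl (fun acc sublist =>
      let x := (PySem.List.pyGet? list1 (-1)).getD []
      if (PySem.List.pyGet? x (-1)).isSome ∧ PySem.List.pyGet? x (-1) = PySem.List.pyGet? sublist 0 then
        match PySem.List.pyGet? sublist 1 with
        | some c => if x.contains c then acc else acc ++ [x ++ [c]]
        | none => acc
      else acc) M
    twolistpath list1.dropLast list2 M'
termination_by list1.length
decreasing_by
  have hp : 0 < list1.length := List.length_pos_of_ne_nil h
  simp [List.length_dropLast]; omega

-- ===== PORT B =====
-- Source B's comprehension filter/extend for one element x and one candidate sublist s.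
def extend2 (x : List Int) (s : List Int) : Option (List Int) :=
  match PySem.List.pyGet? x (-1), PySem.List.pyGet? s 0 with
  | some a, some b =>
    if a = b then
      match PySem.List.pyGet? s 1 with
      | some c => if x.contains c then none else some (x ++ [c])
      | none => none
    else none
  | _, _ => none

def twolistpath_alt (list1 : List (List Int)) (list2 : List (List Int)) (M : List (List Int)) : List (List Int) :=
  M ++ (list1.reverse.flatMap fun x => list2.filterMap (extend2 x))

-- ===== PRECONDITION & SPEC =====
-- Pre_ excludes exactly the inputs where Python A raises IndexError: list1 and list2 both
-- nonempty with an empty element in list1, an empty sublist in list2, or a length-1 sublist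
-- whose single entry matches the last entry of some list1 element (then sublist[1] is read).
def Pre_twolistpath (list1 : List (List Int)) (list2 : List (List Int)) (M : List (List Int)) : Prop :=
  list1 = [] ∨ list2 = [] ∨ ((∀ x ∈ list1, x ≠ []) ∧
    ∀ s ∈ list2, s ≠ [] ∧ (s.length = 1 → ∀ x ∈ list1, x.getLast? ≠ s.head?))
instance (list1 : List (List Int)) (list2 : List (List Int)) (M : List (List Int)) : Decidable (Pre_twolistpath list1 list2 M) := by unfold Pre_twolistpath; infer_instance

def pvWitness_twolistpath : List (List Int) × List (List Int) × List (List Int) :=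
  ([[1], [2, 1]], [[1, 3], [1, 2]], [])

def Spec_twolistpath (list1 : List (List Int)) (list2 : List (List Int)) (M : List (List Int)) (out : List (List Int)) : Prop := out = twolistpath_alt list1 list2 M
instance (list1 : List (List Int)) (list2 : List (List Int)) (M : List (List Int)) (out : List (List Int)) : Decidable (Spec_twolistpath list1 list2 M out) := by unfold Spec_twolistpath; infer_instance

-- ===== CLAIM (what is proved, stated in full; the proofs are below) =====
def Claim_equal_twolistpath : Prop := ∀ (list1 : List (List Int)) (list2 : List (List Int)) (M : List (List Int)), Dom_twolistpath list1 list2 M → Pre_twolistpath list1 list2 M → Spec_twolistpath list1 list2 M (twolistpath list1 list2 M)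

-- ===== LEMMAS AND PROOFS =====

-- A's inner for-loop over list2 (with the popped element x fixed) appends exactly the
-- extensions that B's filterMap produces.
lemma foldl_inner (x : List Int) (l2 : List (List Int)) (M : List (List Int)) :
    l2.foldl (fun acc s =>
      if (PySem.List.pyGet? x (-1)).isSome ∧ PySem.List.pyGet? x (-1) = PySem.List.pyGet? s 0 then
        match PySem.List.pyGet? s 1 with
        | some c => if x.contains c then acc else acc ++ [x ++ [c]]
        | none => acc
      else acc) M = M ++ l2.filterMap (extend2 x) := by
  induction l2 generalizing M with
  | nil => simp
  | cons s t ih =>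
    simp only [List.foldl_cons, List.filterMap_cons, ih]
    cases ha : PySem.List.pyGet? x (-1) with
    | none => simp [extend2, ha]
    | some a =>
      cases hb : PySem.List.pyGet? s 0 with
      | none => simp [extend2, ha, hb]
      | some b =>
        by_cases hab : a = b
        · cases hc : PySem.List.pyGet? s 1 with
          | none => simp [extend2, ha, hb, hc, hab]
          | some c =>
            by_cases hm : c ∈ x
            · simp [extend2, ha, hb, hc, hab, hm]
            · simp [extend2, ha, hb, hc, hab, hm]
        · simp [extend2, ha, hb, hab]

lemma twolistpath_eq (l1 l2 M : List (List Int)) :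
    twolistpath l1 l2 M = M ++ (l1.reverse.flatMap fun x => l2.filterMap (extend2 x)) := by
  induction l1 using List.reverseRecOn generalizing M with
  | nil => rw [twolistpath]; simp
  | append_singleton ys y ih =>
    rw [twolistpath]
    have hne : ys ++ [y] ≠ [] := by simp
    simp only [dif_neg hne, PySem.List.pyGet?_neg_one_append_singleton, Option.getD_some,
      List.dropLast_concat, ih, List.reverse_append, List.reverse_cons, List.reverse_nil,
      List.nil_append, List.cons_append, List.flatMap_cons, foldl_inner, List.append_assoc]

-- ===== VERDICT (by name: the statement is the Claim_ definition above) =====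
theorem twolistpath_spec : Claim_equal_twolistpath := by
  intro l1 l2 M _ _
  unfold Spec_twolistpath twolistpath_alt
  exact twolistpath_eq l1 l2 M
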